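-- pv_equiv track=rewrite | github.com/Zahrinnnnn/Bank-Statement-Parser-Reconciliation-Automation | src/parsers/public_bank_parser.py | _detect_table_columns
-- ===== SOURCE A (Python) =====
-- from typing import Optional
--
-- PBB_DATE_COLUMNS = [
--     "date", "transaction date", "txn date", "trans. date",
--     "trans date", "value date", "posting date",
-- ]
--
-- PBB_DESCRIPTION_COLUMNS = [
--     "transaction description", "description", "particulars",
--     "details", "narration", "transaction details", "remarks",
-- ]
--
-- PBB_DEBIT_COLUMNS = [
--     "withdrawal", "debit", "withdrawal (rm)", "debit (rm)",
--     "dr", "dr (rm)", "debit amount", "cheque/withdrawal",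
-- ]
--
-- PBB_CREDIT_COLUMNS = [
--     "deposit", "credit", "deposit (rm)", "credit (rm)",
--     "cr", "cr (rm)", "credit amount", "deposit/credit",
-- ]
--
-- PBB_BALANCE_COLUMNS = [
--     "balance", "running balance", "balance (rm)",
--     "closing balance", "available balance",
-- ]
--
-- PBB_REFERENCE_COLUMNS = [
--     "reference", "ref", "cheque no", "cheque no.", "ref no",
--     "transaction ref", "txn ref", "cheque/ref",
-- ]
--
-- def _detect_table_columns(header: list[str]) -> dict[str, Optional[int]]:
--     """Use Public Bank-specific column name lists for table column detection."""
--
--     def find_index(candidate_names: list[str]) -> Optional[int]: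
--         candidate_set = {name.lower().strip() for name in candidate_names}
--         for index, cell in enumerate(header):
--             if cell.lower().strip() in candidate_set:
--                 return index
--         return None
--
--     return {
--         "transaction_date": find_index(PBB_DATE_COLUMNS),
--         "description":      find_index(PBB_DESCRIPTION_COLUMNS),
--         "debit_amount":     find_index(PBB_DEBIT_COLUMNS),
--         "credit_amount":    find_index(PBB_CREDIT_COLUMNS),
--         "amount":           None,  # Public Bank uses split debit/credit columns
--         "balance":          find_index(PBB_BALANCE_COLUMNS),
--         "reference":        find_index(PBB_REFERENCE_COLUMNS),
--     }
-- ===== SOURCE B (Python) =====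
-- from typing import Optional
--
-- PBB_DATE_COLUMNS = [
--     "date", "transaction date", "txn date", "trans. date",
--     "trans date", "value date", "posting date",
-- ]
--
-- PBB_DESCRIPTION_COLUMNS = [
--     "transaction description", "description", "particulars",
--     "details", "narration", "transaction details", "remarks",
-- ]
--
-- PBB_DEBIT_COLUMNS = [
--     "withdrawal", "debit", "withdrawal (rm)", "debit (rm)",
--     "dr", "dr (rm)", "debit amount", "cheque/withdrawal",
-- ]
--
-- PBB_CREDIT_COLUMNS = [
--     "deposit", "credit", "deposit (rm)", "credit (rm)",
--     "cr", "cr (rm)", "credit amount", "deposit/credit",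
-- ]
--
-- PBB_BALANCE_COLUMNS = [
--     "balance", "running balance", "balance (rm)",
--     "closing balance", "available balance",
-- ]
--
-- PBB_REFERENCE_COLUMNS = [
--     "reference", "ref", "cheque no", "cheque no.", "ref no",
--     "transaction ref", "txn ref", "cheque/ref",
-- ]
--
-- _PBB_CATEGORY_SETS = {
--     "transaction_date": {n.lower().strip() for n in PBB_DATE_COLUMNS},
--     "description":      {n.lower().strip() for n in PBB_DESCRIPTION_COLUMNS},
--     "debit_amount":     {n.lower().strip() for n in PBB_DEBIT_COLUMNS},
--     "credit_amount":    {n.lower().strip() for n in PBB_CREDIT_COLUMNS},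
--     "balance":          {n.lower().strip() for n in PBB_BALANCE_COLUMNS},
--     "reference":        {n.lower().strip() for n in PBB_REFERENCE_COLUMNS},
-- }
--
-- def _detect_table_columns(header: list[str]) -> dict[str, Optional[int]]:
--     """Single reverse pass: overwriting on each match leaves the FIRST match."""
--     found: dict[str, Optional[int]] = {key: None for key in _PBB_CATEGORY_SETS}
--     for index in range(len(header) - 1, -1, -1):
--         cell = header[index].lower().strip()
--         for key, names in _PBB_CATEGORY_SETS.items():
--             if cell in names:
--                 found[key] = index
--     return {
--         "transaction_date": found["transaction_date"],
--         "description":      found["description"],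
--         "debit_amount":     found["debit_amount"],
--         "credit_amount":    found["credit_amount"],
--         "amount":           None,
--         "balance":          found["balance"],
--         "reference":        found["reference"],
--     }
-- ===== Notes on version B (the rewrite author's own statement) =====
-- stated objective: alternative
-- what changed: Replaces six independent forward scans of the header (one early-return scan per category) by a single reverse pass over the header that unconditionally overwrites each category's slot on a match, so the last write (= first occurrence) survives.
import Mathlib
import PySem

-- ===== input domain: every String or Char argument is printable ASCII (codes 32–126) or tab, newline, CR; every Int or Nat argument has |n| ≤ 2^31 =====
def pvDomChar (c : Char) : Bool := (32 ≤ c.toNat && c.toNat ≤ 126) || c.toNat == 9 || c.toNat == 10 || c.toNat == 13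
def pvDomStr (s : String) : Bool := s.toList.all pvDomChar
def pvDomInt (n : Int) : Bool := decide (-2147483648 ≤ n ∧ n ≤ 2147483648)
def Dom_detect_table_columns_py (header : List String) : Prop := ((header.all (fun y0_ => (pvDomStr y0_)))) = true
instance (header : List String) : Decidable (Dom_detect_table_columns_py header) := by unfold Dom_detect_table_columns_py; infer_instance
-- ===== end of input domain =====

-- ===== PORT A =====
-- B changes: one reverse pass with overwrite-on-match instead of six forward scans of the header (alternative algorithm, same cost class).

-- shared module constants (candidate name lists from the Python module)
def PBB_DATE_COLUMNS : List String :=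
  ["date", "transaction date", "txn date", "trans. date",
   "trans date", "value date", "posting date"]
def PBB_DESCRIPTION_COLUMNS : List String :=
  ["transaction description", "description", "particulars",
   "details", "narration", "transaction details", "remarks"]
def PBB_DEBIT_COLUMNS : List String :=
  ["withdrawal", "debit", "withdrawal (rm)", "debit (rm)",
   "dr", "dr (rm)", "debit amount", "cheque/withdrawal"]
def PBB_CREDIT_COLUMNS : List String :=
  ["deposit", "credit", "deposit (rm)", "credit (rm)",
   "cr", "cr (rm)", "credit amount", "deposit/credit"]
def PBB_BALANCE_COLUMNS : List String :=
  ["balance", "running balance", "balance (rm)",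
   "closing balance", "available balance"]
def PBB_REFERENCE_COLUMNS : List String :=
  ["reference", "ref", "cheque no", "cheque no.", "ref no",
   "transaction ref", "txn ref", "cheque/ref"]

-- cell.lower().strip(), used by both Pythons
def pvNorm (s : String) : String := PySem.Str.strip (PySem.Str.lower s)

-- A's 'for index, cell in enumerate(header): if cell.lower().strip() in candidate_set: return index'
def aFindAux (cset : PySem.Set String) (header : List String) (i : Int) : Option Int :=
  match header with
  | [] => none
  | cell :: rest => if pvNorm cell ∈ cset then some i else aFindAux cset rest (i + 1)

-- A's find_index: build the normalized candidate set, then scan the header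
def aFindIndex (candidate_names : List String) (header : List String) : Option Int :=
  aFindAux (PySem.Set.ofList (candidate_names.map pvNorm)) header 0

def detect_table_columns_py (header : List String) : List (String × Option Int) :=
  [("transaction_date", aFindIndex PBB_DATE_COLUMNS header),
   ("description",      aFindIndex PBB_DESCRIPTION_COLUMNS header),
   ("debit_amount",     aFindIndex PBB_DEBIT_COLUMNS header),
   ("credit_amount",    aFindIndex PBB_CREDIT_COLUMNS header),
   ("amount",           none),
   ("balance",          aFindIndex PBB_BALANCE_COLUMNS header),
   ("reference",        aFindIndex PBB_REFERENCE_COLUMNS header)]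

-- ===== PORT B =====
-- Source B's precomputed normalized category sets
def bDateSet : PySem.Set String := PySem.Set.ofList (PBB_DATE_COLUMNS.map pvNorm)
def bDescSet : PySem.Set String := PySem.Set.ofList (PBB_DESCRIPTION_COLUMNS.map pvNorm)
def bDebitSet : PySem.Set String := PySem.Set.ofList (PBB_DEBIT_COLUMNS.map pvNorm)
def bCreditSet : PySem.Set String := PySem.Set.ofList (PBB_CREDIT_COLUMNS.map pvNorm)
def bBalanceSet : PySem.Set String := PySem.Set.ofList (PBB_BALANCE_COLUMNS.map pvNorm)
def bRefSet : PySem.Set String := PySem.Set.ofList (PBB_REFERENCE_COLUMNS.map pvNorm)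

-- one slot update: 'if cell in names: found[key] = index'
def bUpd (names : PySem.Set String) (i : Int) (cell : String) (o : Option Int) : Option Int :=
  if cell ∈ names then some i else o

-- Source B's loop body for one index (the inner 'for key, names in ...' unrolled over the six fixed keys)
def bStep (p : Int × String)
    (st : Option Int × Option Int × Option Int × Option Int × Option Int × Option Int) :
    Option Int × Option Int × Option Int × Option Int × Option Int × Option Int :=
  let cell := pvNorm p.2
  (bUpd bDateSet p.1 cell st.1, bUpd bDescSet p.1 cell st.2.1,
   bUpd bDebitSet p.1 cell st.2.2.1, bUpd bCreditSet p.1 cell st.2.2.2.1,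
   bUpd bBalanceSet p.1 cell st.2.2.2.2.1, bUpd bRefSet p.1 cell st.2.2.2.2.2)

def detect_table_columns_py_alt (header : List String) : List (String × Option Int) :=
  -- 'for index in range(len(header)-1, -1, -1)': descending index order = foldr over enumerate
  let found := (PySem.List.enumerate header 0).foldr bStep (none, none, none, none, none, none)
  [("transaction_date", found.1),
   ("description",      found.2.1),
   ("debit_amount",     found.2.2.1),
   ("credit_amount",    found.2.2.2.1),
   ("amount",           none),
   ("balance",          found.2.2.2.2.1),
   ("reference",        found.2.2.2.2.2)]

-- ===== PRECONDITION & SPEC =====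
def Spec_detect_table_columns_py (header : List String) (out : List (String × Option Int)) : Prop := out = detect_table_columns_py_alt header
instance (header : List String) (out : List (String × Option Int)) : Decidable (Spec_detect_table_columns_py header out) := by unfold Spec_detect_table_columns_py; infer_instance

-- ===== CLAIM (what is proved, stated in full; the proofs are below) =====
def Claim_equal_detect_table_columns_py : Prop := ∀ (header : List String), Dom_detect_table_columns_py header → Spec_detect_table_columns_py header (detect_table_columns_py header)

-- ===== LEMMAS AND PROOFS =====

-- the reverse overwrite-fold computes, in each slot, A's first-match scan
theorem bFold_eq (header : List String) (s : Int) :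
    (PySem.List.enumerate header s).foldr bStep (none, none, none, none, none, none) =
      (aFindAux bDateSet header s, aFindAux bDescSet header s, aFindAux bDebitSet header s,
       aFindAux bCreditSet header s, aFindAux bBalanceSet header s, aFindAux bRefSet header s) := by
  induction header generalizing s with
  | nil => simp [PySem.List.enumerate_nil, aFindAux]
  | cons x xs ih =>
    rw [PySem.List.enumerate_cons]
    simp only [List.foldr_cons, ih, bStep, bUpd, aFindAux]

-- ===== VERDICT (by name: the statement is the Claim_ definition above) =====
theorem detect_table_columns_py_spec : Claim_equal_detect_table_columns_py := by
  intro header _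
  unfold Spec_detect_table_columns_py detect_table_columns_py detect_table_columns_py_alt
  rw [bFold_eq]
  rfl
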